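-- pv_equiv track=rewrite | github.com/pisterlabs/promptset | data/scraping-2.0/repos/cengizozel~SOPHIE-Feedback/pdf_generation~compute_metrics.py | get_open_ended_result
-- ===== SOURCE A (Python) =====
-- def get_open_ended_result(score):
--     ranks = {
--         (0, 3): 1,
--         (3, 50): 2
--     }
--
--     for interval, rank in ranks.items():
--         if interval[0] <= score < interval[1]:
--             return rank
--
--     return 2
-- ===== SOURCE B (Python) =====
-- def get_open_ended_result(score):
--     return 1 if 0 <= score < 3 else 2
-- ===== Notes on version B (the rewrite author's own statement) =====
-- stated objective: simpler
-- what changed: Replaces the interval-dict plus lookup loop with a single closed-form conditional: 1 if 0 <= score < 3 else 2 (the (3,50) interval and the fallback both yield 2).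
import Mathlib
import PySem

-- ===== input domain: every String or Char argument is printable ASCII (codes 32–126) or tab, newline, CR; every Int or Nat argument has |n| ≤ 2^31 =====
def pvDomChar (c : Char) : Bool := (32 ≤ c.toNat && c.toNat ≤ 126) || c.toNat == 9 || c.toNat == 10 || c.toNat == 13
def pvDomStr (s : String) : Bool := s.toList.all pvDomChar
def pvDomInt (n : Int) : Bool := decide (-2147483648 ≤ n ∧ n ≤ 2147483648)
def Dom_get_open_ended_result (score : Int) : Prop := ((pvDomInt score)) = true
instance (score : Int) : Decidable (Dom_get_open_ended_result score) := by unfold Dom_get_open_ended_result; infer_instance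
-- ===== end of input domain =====

-- B replaces the interval-dict and lookup loop with one closed-form conditional (simpler).


-- ===== PORT A =====
-- literal port: the dict of intervals is an association list in insertion order;
-- the for-loop scans it and returns the first matching rank, else the fallback 2.
def pyRanks : List ((Int × Int) × Int) := [((0, 3), 1), ((3, 50), 2)]

def pyScanRanks (score : Int) : List ((Int × Int) × Int) → Int
  | [] => 2
  | (interval, rank) :: rest =>
      if interval.1 ≤ score ∧ score < interval.2 then rank
      else pyScanRanks score rest

def get_open_ended_result (score : Int) : Int := pyScanRanks score pyRanks

-- ===== PORT B =====
def get_open_ended_result_alt (score : Int) : Int := if 0 ≤ score ∧ score < 3 then 1 else 2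

-- ===== PRECONDITION & SPEC =====
def Spec_get_open_ended_result (score : Int) (out : Int) : Prop := out = get_open_ended_result_alt score
instance (score : Int) (out : Int) : Decidable (Spec_get_open_ended_result score out) := by unfold Spec_get_open_ended_result; infer_instance

-- ===== CLAIM (what is proved, stated in full; the proofs are below) =====
def Claim_equal_get_open_ended_result : Prop := ∀ (score : Int), Dom_get_open_ended_result score → Spec_get_open_ended_result score (get_open_ended_result score)

-- ===== LEMMAS AND PROOFS =====

-- ===== VERDICT (by name: the statement is the Claim_ definition above) =====
theorem get_open_ended_result_spec : Claim_equal_get_open_ended_result := by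
  intro score _
  unfold Spec_get_open_ended_result get_open_ended_result get_open_ended_result_alt pyRanks
  simp only [pyScanRanks]
  split_ifs <;> omega
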